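-- pv_equiv track=rewrite | github.com/maticarreras8-coder/cardio-onco-hb | core/domain_engine.py | detect_inflammatory_domain
-- ===== SOURCE A (Python) =====
-- from typing import Dict, List, Any
--
-- def _contains_any(text: str, keywords: List[str]) -> bool:
--     """
--     Devuelve True si el texto contiene cualquiera de las palabras clave.
--     """
--     if not text:
--         return False
--
--     text_lower = text.lower()
--     return any(keyword.lower() in text_lower for keyword in keywords)
--
-- def detect_inflammatory_domain(
--     treatment_items: List[Dict[str, Any]]
-- ) -> Dict[str, str]:
--     """
--     Detecta dominio inflamatorio / miocarditis / pericardio.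
--     """
--     level = "not_relevant"
--     reasons = []
--
--     keywords = [
--         "myocarditis",
--         "pericarditis",
--         "pericardial effusion",
--         "tamponade",
--         "cardiac tamponade",
--     ]
--
--     for item in treatment_items:
--         other = item.get("other_manifestations", "")
--         if _contains_any(other, keywords):
--             reasons.append(f"{item['label']}: {other}")
--
--             if "fatal myocarditis" in other.lower():
--                 level = "priority"
--             elif level == "not_relevant":
--                 level = "present"
--             elif level == "present":
--                 level = "relevant"
--
--     return {
--         "domain_code": "inflammatory_myocarditis",
--         "domain_name_es": "Inflamatorio / miocarditis / pericardio",
--         "domain_name_en": "Inflammatory / myocarditis / pericardium",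
--         "domain_level": level,
--         "domain_reason": "; ".join(dict.fromkeys(reasons))
--     }
-- ===== SOURCE B (Python) =====
-- from typing import Dict, List, Any
--
-- def _contains_any(text: str, keywords: List[str]) -> bool:
--     if not text:
--         return False
--     text_lower = text.lower()
--     return any(keyword.lower() in text_lower for keyword in keywords)
--
-- def detect_inflammatory_domain(
--     treatment_items: List[Dict[str, Any]]
-- ) -> Dict[str, str]:
--     keywords = [
--         "myocarditis",
--         "pericarditis",
--         "pericardial effusion",
--         "tamponade",
--         "cardiac tamponade",
--     ]
--
--     matched = [item for item in treatment_items
--                if _contains_any(item.get("other_manifestations", ""), keywords)]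
--     reasons = [f"{item['label']}: {item.get('other_manifestations', '')}"
--                for item in matched]
--     texts = [item.get("other_manifestations", "").lower() for item in matched]
--
--     if any("fatal myocarditis" in t for t in texts):
--         level = "priority"
--     elif len(matched) >= 2:
--         level = "relevant"
--     elif len(matched) == 1:
--         level = "present"
--     else:
--         level = "not_relevant"
--
--     return {
--         "domain_code": "inflammatory_myocarditis",
--         "domain_name_es": "Inflamatorio / miocarditis / pericardio",
--         "domain_name_en": "Inflammatory / myocarditis / pericardium",
--         "domain_level": level,
--         "domain_reason": "; ".join(dict.fromkeys(reasons))
--     }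
-- ===== Notes on version B (the rewrite author's own statement) =====
-- stated objective: simpler
-- what changed: Replaces A's in-loop order-dependent level state machine with staged passes: filter the matched items once, derive reasons and lowercased texts by comprehensions, and classify the level by a closed form (any 'fatal myocarditis' -> priority, else by the matched count).
import Mathlib
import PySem

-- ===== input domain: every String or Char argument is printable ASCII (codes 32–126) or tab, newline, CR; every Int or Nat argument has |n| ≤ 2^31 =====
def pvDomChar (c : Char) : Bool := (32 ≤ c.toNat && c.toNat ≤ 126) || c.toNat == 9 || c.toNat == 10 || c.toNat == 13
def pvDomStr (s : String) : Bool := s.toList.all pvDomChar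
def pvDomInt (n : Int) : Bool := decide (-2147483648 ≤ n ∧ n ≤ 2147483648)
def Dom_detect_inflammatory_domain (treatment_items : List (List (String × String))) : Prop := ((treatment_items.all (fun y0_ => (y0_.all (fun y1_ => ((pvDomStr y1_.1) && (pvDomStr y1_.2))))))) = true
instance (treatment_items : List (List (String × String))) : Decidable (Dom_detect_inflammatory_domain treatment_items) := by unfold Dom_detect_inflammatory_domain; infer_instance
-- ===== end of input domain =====

-- B replaces A's in-loop order-dependent level state machine with staged passes
-- (filter the matched items, then derive reasons/texts, then classify by a closed form);
-- same return value, objective: simpler.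

-- ===== PORT A =====
-- shared module helper _contains_any (used verbatim by both Pythons)
def pv_contains_any (text : String) (keywords : List String) : Bool :=
  if text = "" then false
  else
    let text_lower := PySem.Str.lower text
    keywords.any (fun keyword => PySem.Str.isIn (PySem.Str.lower keyword) text_lower)

def pv_keywords : List String :=
  ["myocarditis", "pericarditis", "pericardial effusion", "tamponade", "cardiac tamponade"]

def pv_header : List (String × String) :=
  [("domain_code", "inflammatory_myocarditis"),
   ("domain_name_es", "Inflamatorio / miocarditis / pericardio"),
   ("domain_name_en", "Inflammatory / myocarditis / pericardium")]

-- A's loop: state (level, reasons); `none` marks the KeyError on item['label'] (excluded by Pre_)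
def pvA_step (acc : Option (String × List String)) (item : List (String × String)) :
    Option (String × List String) :=
  match acc with
  | none => none
  | some (level, reasons) =>
    let other := (PySem.Dict.mk item).getD "other_manifestations" ""
    if pv_contains_any other pv_keywords then
      match (PySem.Dict.mk item).get? "label" with
      | none => none   -- Python raises KeyError here
      | some lab =>
        let reasons := reasons ++ [lab ++ ": " ++ other]
        let level :=
          if PySem.Str.isIn "fatal myocarditis" (PySem.Str.lower other) then "priority"
          else if level = "not_relevant" then "present"
          else if level = "present" then "relevant"
          else level
        some (level, reasons)
    else some (level, reasons)

def detect_inflammatory_domain (treatment_items : List (List (String × String))) : List (String × String) :=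
  match treatment_items.foldl pvA_step (some ("not_relevant", [])) with
  | none => []   -- unreachable under Pre_ (Python raises KeyError)
  | some (level, reasons) =>
      pv_header ++ [("domain_level", level),
                    ("domain_reason", PySem.Str.join "; " (PySem.List.dedup reasons))]

-- ===== PORT B =====
-- staged passes: filter, then two comprehensions, then closed-form classification
def detect_inflammatory_domain_alt (treatment_items : List (List (String × String))) : List (String × String) :=
  let matched := treatment_items.filter
    (fun item => pv_contains_any ((PySem.Dict.mk item).getD "other_manifestations" "") pv_keywords)
  -- the reasons comprehension may raise KeyError: modelled as Option via mapM
  match matched.mapM (fun item =>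
      ((PySem.Dict.mk item).get? "label").map
        (fun lab => lab ++ ": " ++ (PySem.Dict.mk item).getD "other_manifestations" "")) with
  | none => []   -- unreachable under Pre_ (Python raises KeyError)
  | some reasons =>
    let texts := matched.map
      (fun item => PySem.Str.lower ((PySem.Dict.mk item).getD "other_manifestations" ""))
    let level :=
      if texts.any (fun t => PySem.Str.isIn "fatal myocarditis" t) then "priority"
      else if 2 ≤ matched.length then "relevant"
      else if matched.length = 1 then "present"
      else "not_relevant"
    pv_header ++ [("domain_level", level),
                  ("domain_reason", PySem.Str.join "; " (PySem.List.dedup reasons))]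

-- ===== PRECONDITION & SPEC =====
-- Pre_ excludes inputs on which both Pythons raise KeyError: an item whose
-- "other_manifestations" text matches a keyword but which has no "label" key.
def Pre_detect_inflammatory_domain (treatment_items : List (List (String × String))) : Prop :=
  ∀ item ∈ treatment_items,
    pv_contains_any ((PySem.Dict.mk item).getD "other_manifestations" "") pv_keywords = true →
    (PySem.Dict.mk item).contains "label" = true

instance (treatment_items : List (List (String × String))) : Decidable (Pre_detect_inflammatory_domain treatment_items) := by unfold Pre_detect_inflammatory_domain; infer_instance

def pvWitness_detect_inflammatory_domain : (List (List (String × String))) :=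
  [[("label", "nivolumab"), ("other_manifestations", "Fatal myocarditis")],
   [("label", "x"), ("other_manifestations", "pericarditis")],
   [("other_manifestations", "none")]]

def Spec_detect_inflammatory_domain (treatment_items : List (List (String × String))) (out : List (String × String)) : Prop := out = detect_inflammatory_domain_alt treatment_items
instance (treatment_items : List (List (String × String))) (out : List (String × String)) : Decidable (Spec_detect_inflammatory_domain treatment_items out) := by unfold Spec_detect_inflammatory_domain; infer_instance

-- ===== CLAIM (what is proved, stated in full; the proofs are below) =====
def Claim_equal_detect_inflammatory_domain : Prop := ∀ (treatment_items : List (List (String × String))), Dom_detect_inflammatory_domain treatment_items → Pre_detect_inflammatory_domain treatment_items → Spec_detect_inflammatory_domain treatment_items (detect_inflammatory_domain treatment_items)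

-- ===== LEMMAS AND PROOFS =====

def pvOther (item : List (String × String)) : String :=
  (PySem.Dict.mk item).getD "other_manifestations" ""

def pvHit (item : List (String × String)) : Bool :=
  pv_contains_any (pvOther item) pv_keywords

def pvLab (item : List (String × String)) : String :=
  ((PySem.Dict.mk item).get? "label").getD ""

def pvF (texts : List String) : Bool :=
  texts.any (fun t => PySem.Str.isIn "fatal myocarditis" t)

def pvClassify (fatal : Bool) (n : Nat) : String :=
  if fatal then "priority"
  else if 2 ≤ n then "relevant"
  else if n = 1 then "present"
  else "not_relevant"

def pvTexts (l : List (List (String × String))) : List String :=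
  (l.filter pvHit).map (fun it => PySem.Str.lower (pvOther it))

def pvReasons (l : List (List (String × String))) : List String :=
  (l.filter pvHit).map (fun it => pvLab it ++ ": " ++ pvOther it)

-- A's level transition from a classified state, abstractly
theorem pvLevel_step (fx f : Bool) (n : Nat) :
    (if fx = true then "priority"
     else if pvClassify f n = "not_relevant" then "present"
     else if pvClassify f n = "present" then "relevant"
     else pvClassify f n) = pvClassify (f || fx) (n + 1) := by
  cases fx <;> cases f <;> simp only [pvClassify, Bool.or_true,
    Bool.or_false, if_true] <;> rcases n with _ | _ | n <;> simp

-- A's fold from a classified state lands in the classified state of the staged data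
theorem pvA_fold (l : List (List (String × String)))
    (hpre : ∀ it ∈ l, pvHit it = true → ((PySem.Dict.mk it).get? "label").isSome = true) :
    ∀ ms rs, l.foldl pvA_step (some (pvClassify (pvF ms) ms.length, rs)) =
      some (pvClassify (pvF (ms ++ pvTexts l)) ((ms ++ pvTexts l).length), rs ++ pvReasons l) := by
  induction l with
  | nil => intro ms rs; simp [pvTexts, pvReasons]
  | cons it t ih =>
    intro ms rs
    by_cases hm : pvHit it = true
    · obtain ⟨lab, hl⟩ := Option.isSome_iff_exists.mp (hpre it List.mem_cons_self hm)
      have hstep : pvA_step (some (pvClassify (pvF ms) ms.length, rs)) it =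
          some (pvClassify (pvF (ms ++ [PySem.Str.lower (pvOther it)])) (ms.length + 1),
                rs ++ [lab ++ ": " ++ pvOther it]) := by
        simp only [pvA_step]
        rw [show ((PySem.Dict.mk it).getD "other_manifestations" "") = pvOther it from rfl]
        rw [show pv_contains_any (pvOther it) pv_keywords = pvHit it from rfl, hm, if_pos rfl, hl]
        refine congrArg some (Prod.ext ?_ rfl)
        have : pvF (ms ++ [PySem.Str.lower (pvOther it)]) =
            (pvF ms || PySem.Str.isIn "fatal myocarditis" (PySem.Str.lower (pvOther it))) := by
          simp [pvF]
        rw [this]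
        exact pvLevel_step _ _ _
      have hlab : pvLab it = lab := by simp [pvLab, hl]
      have htail := ih (fun i hi => hpre i (List.mem_cons_of_mem _ hi))
        (ms ++ [PySem.Str.lower (pvOther it)]) (rs ++ [lab ++ ": " ++ pvOther it])
      rw [List.foldl_cons]
      rw [show (ms ++ [PySem.Str.lower (pvOther it)]).length = ms.length + 1 by simp] at htail
      rw [hstep, htail]
      simp [pvTexts, pvReasons, hm, hlab, List.append_assoc]
    · have hm' : pvHit it = false := by simpa using hm
      have hstep : pvA_step (some (pvClassify (pvF ms) ms.length, rs)) it =
          some (pvClassify (pvF ms) ms.length, rs) := by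
        simp only [pvA_step]
        rw [show ((PySem.Dict.mk it).getD "other_manifestations" "") = pvOther it from rfl]
        rw [show pv_contains_any (pvOther it) pv_keywords = pvHit it from rfl, hm']
        simp
      rw [List.foldl_cons, hstep, ih (fun i hi => hpre i (List.mem_cons_of_mem _ hi)) ms rs]
      simp [pvTexts, pvReasons, hm']

-- B's reasons comprehension succeeds and is the map, when every matched item has a label
theorem pvB_mapM (m : List (List (String × String)))
    (h : ∀ it ∈ m, ((PySem.Dict.mk it).get? "label").isSome = true) :
    m.mapM (fun item =>
      ((PySem.Dict.mk item).get? "label").map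
        (fun lab => lab ++ ": " ++ (PySem.Dict.mk item).getD "other_manifestations" "")) =
      some (m.map (fun it => pvLab it ++ ": " ++ pvOther it)) := by
  induction m with
  | nil => rfl
  | cons it t ih =>
    obtain ⟨lab, hl⟩ := Option.isSome_iff_exists.mp (h it List.mem_cons_self)
    have hlab : pvLab it = lab := by simp [pvLab, hl]
    simp only [List.mapM_cons, hl, Option.map_some,
      ih (fun i hi => h i (List.mem_cons_of_mem _ hi))]
    simp [hlab, pvOther]

-- ===== VERDICT (by name: the statement is the Claim_ definition above) =====
theorem detect_inflammatory_domain_spec : Claim_equal_detect_inflammatory_domain := by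
  intro l _ hpre
  have hpre' : ∀ it ∈ l, pvHit it = true → ((PySem.Dict.mk it).get? "label").isSome = true := by
    intro it hi hh
    have := hpre it hi hh
    rwa [PySem.Dict.contains_eq_isSome_get?] at this
  unfold Spec_detect_inflammatory_domain detect_inflammatory_domain detect_inflammatory_domain_alt
  have hA := pvA_fold l hpre' [] []
  have h0 : (some ("not_relevant", ([] : List String))) =
      some (pvClassify (pvF []) ([] : List String).length, ([] : List String)) := rfl
  rw [h0, hA]
  have hmatched : l.filter
      (fun item => pv_contains_any ((PySem.Dict.mk item).getD "other_manifestations" "") pv_keywords) =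
      l.filter pvHit := rfl
  simp only [hmatched, pvB_mapM (l.filter pvHit)
    (fun it hi => hpre' it (List.mem_of_mem_filter hi) (List.of_mem_filter hi))]
  simp only [List.nil_append]
  have htx : (l.filter pvHit).map (fun item =>
      PySem.Str.lower ((PySem.Dict.mk item).getD "other_manifestations" "")) = pvTexts l := rfl
  rw [htx]
  have hlen : (pvTexts l).length = (l.filter pvHit).length := by simp [pvTexts]
  simp only [pvClassify, pvF, pvReasons, hlen]
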